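-- pv_equiv track=rewrite | github.com/Yash-Salokhe/leetcode | HollowInvertedTriangle.py | generate_hollow_inverted_right_angled_triangle
-- ===== SOURCE A (Python) =====
-- def generate_hollow_inverted_right_angled_triangle(n):
--     """
--     Function to return a hollow inverted right-angled triangle of '*' of side n as a list of strings.
--
--     Parameters:
--     n (int): The height of the triangle.
--
--     Returns:
--     list: A list of strings where each string represents a row of the triangle.
--     """
--     result = []
--     for i in range(n,0,-1):
--         if i==n or i<=2:
--             result.append("*"*i)
--         else:
--             result.append("*"+" "*(i-2)+ "*")
--
--     return result
-- ===== SOURCE B (Python) =====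
-- def generate_hollow_inverted_right_angled_triangle(n):
--     # Coordinate-predicate algorithm: each character is determined by its
--     # (row, column) position alone -- '*' exactly on the triangle's boundary
--     # (top row k == 0, left column j == 0, diagonal j == width-1), ' ' inside.
--     return [''.join('*' if k == 0 or j == 0 or j == n - k - 1 else ' '
--                     for j in range(n - k))
--             for k in range(n)]
-- ===== Notes on version B (the rewrite author's own statement) =====
-- stated objective: alternative
-- what changed: Replaces A's per-row branch between a solid string and a concatenated hollow string by a coordinate predicate: every character is computed independently from its (row, column) position -- '*' iff it lies on the top row, the left column or the diagonal -- and rows are joined character by character.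
import Mathlib
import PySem

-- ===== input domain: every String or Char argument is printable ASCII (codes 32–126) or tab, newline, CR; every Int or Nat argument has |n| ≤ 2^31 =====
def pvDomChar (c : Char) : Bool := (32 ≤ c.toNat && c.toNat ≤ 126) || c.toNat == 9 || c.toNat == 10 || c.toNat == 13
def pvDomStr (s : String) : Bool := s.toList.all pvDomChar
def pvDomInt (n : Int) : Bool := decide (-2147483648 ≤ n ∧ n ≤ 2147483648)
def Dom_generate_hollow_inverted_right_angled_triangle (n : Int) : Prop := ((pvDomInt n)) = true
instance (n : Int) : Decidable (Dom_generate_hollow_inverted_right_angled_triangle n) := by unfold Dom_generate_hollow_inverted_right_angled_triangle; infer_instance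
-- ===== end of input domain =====

-- B computes every character from its (row, column) coordinates by a boundary predicate instead of branching per row between a solid and a concatenated hollow string (alternative algorithm, same cost).

-- ===== PORT A =====
def generate_hollow_inverted_right_angled_triangle (n : Int) : List String :=
  (PySem.List.pyRange n 0 (-1)).foldl
    (fun result i =>
      if i = n ∨ i ≤ 2 then
        result ++ [String.ofList (PySem.List.pyRepeat ['*'] i)]
      else
        result ++ [String.ofList (['*'] ++ PySem.List.pyRepeat [' '] (i - 2) ++ ['*'])])
    []

-- ===== PORT B =====
def generate_hollow_inverted_right_angled_triangle_alt (n : Int) : List String :=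
  (PySem.List.pyRange 0 n 1).map (fun k =>
    String.ofList ((PySem.List.pyRange 0 (n - k) 1).map
      (fun j => if k = 0 ∨ j = 0 ∨ j = n - k - 1 then '*' else ' ')))

-- ===== PRECONDITION & SPEC =====
def Spec_generate_hollow_inverted_right_angled_triangle (n : Int) (out : List String) : Prop := out = generate_hollow_inverted_right_angled_triangle_alt n
instance (n : Int) (out : List String) : Decidable (Spec_generate_hollow_inverted_right_angled_triangle n out) := by unfold Spec_generate_hollow_inverted_right_angled_triangle; infer_instance

-- ===== CLAIM (what is proved, stated in full; the proofs are below) =====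
def Claim_equal_generate_hollow_inverted_right_angled_triangle : Prop := ∀ (n : Int), Dom_generate_hollow_inverted_right_angled_triangle n → Spec_generate_hollow_inverted_right_angled_triangle n (generate_hollow_inverted_right_angled_triangle n)

-- ===== LEMMAS AND PROOFS =====

def pvStars (i : Int) : List Char := PySem.List.pyRepeat ['*'] i
def pvHollow (i : Int) : List Char := ['*'] ++ PySem.List.pyRepeat [' '] (i - 2) ++ ['*']

theorem pv_A_eq (n : Int) : generate_hollow_inverted_right_angled_triangle n
    = (PySem.List.pyRange n 0 (-1)).map
        (fun i => String.ofList (if i = n ∨ i ≤ 2 then pvStars i else pvHollow i)) := by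
  unfold generate_hollow_inverted_right_angled_triangle
  rw [PySem.List.foldl_congr_mem _ _
        (fun acc i => acc ++ [String.ofList (if i = n ∨ i ≤ 2 then pvStars i else pvHollow i)]) _
        (by intro acc i _; by_cases h : i = n ∨ i ≤ 2 <;> simp [h, pvStars, pvHollow])]
  rw [PySem.List.foldl_append_singleton_eq_map]
  simp

-- per-row equality: A's row string for i = n - k equals B's coordinate-built row
theorem pv_row_eq (n : Int) (k : Nat) (hk : (k : Int) < n) :
    (if n - k = n ∨ n - k ≤ 2 then pvStars (n - k) else pvHollow (n - k))
      = (PySem.List.pyRange 0 (n - k) 1).map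
          (fun j => if (k : Int) = 0 ∨ j = 0 ∨ j = n - k - 1 then '*' else ' ') := by
  rw [PySem.List.pyRange_one]
  simp only [sub_zero, zero_add, List.map_map]
  by_cases hc : n - (k : Int) = n ∨ n - (k : Int) ≤ 2
  · rw [if_pos hc]
    unfold pvStars
    rw [PySem.List.pyRepeat_singleton]
    apply List.ext_getElem
    · simp
    · intro t h1 h2
      simp only [List.getElem_replicate, List.getElem_map, List.getElem_range,
        Function.comp_apply]
      simp only [List.length_map, List.length_range] at h2
      rw [if_pos]
      rcases hc with hc | hc
      · left; omega
      · right
        by_cases ht : t = 0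
        · left; simp [ht]
        · right; omega
  · rw [if_neg hc]
    push Not at hc
    unfold pvHollow
    rw [PySem.List.pyRepeat_singleton]
    apply List.ext_getElem
    · simp; omega
    · intro t h1 h2
      simp only [List.getElem_map, List.getElem_range, Function.comp_apply]
      simp only [List.length_append, List.length_replicate, List.length_cons,
        List.length_nil] at h1
      simp only [List.length_map, List.length_range] at h2
      by_cases ht0 : t = 0
      · subst ht0
        simp only [List.getElem_append, List.length_cons, List.length_nil]
        rw [if_pos (by right; left; norm_num)]
        rfl
      · by_cases htl : t = (n - (k : Int) - 2).toNat + 1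
        · rw [if_pos (by right; right; omega)]
          have : ¬ t < (['*'] ++ List.replicate (n - ↑k - 2).toNat ' ').length := by
            simp; omega
          rw [List.getElem_append_right (by simpa using le_of_not_gt this)]
          simp [htl]
        · rw [if_neg (by
            push Not
            refine ⟨by omega, by exact_mod_cast ht0, by omega⟩)]
          have hlt : t < (['*'] ++ List.replicate (n - ↑k - 2).toNat ' ').length := by
            simp; omega
          rw [List.getElem_append_left hlt]
          have hcons : (['*'] ++ List.replicate (n - ↑k - 2).toNat ' ') = '*' :: List.replicate (n - ↑k - 2).toNat ' ' := rfl
          simp only [hcons, List.getElem_cons]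
          rw [dif_neg ht0]
          simp

-- ===== VERDICT (by name: the statement is the Claim_ definition above) =====
theorem generate_hollow_inverted_right_angled_triangle_spec : Claim_equal_generate_hollow_inverted_right_angled_triangle := by
  intro n _
  unfold Spec_generate_hollow_inverted_right_angled_triangle
  rw [pv_A_eq]
  unfold generate_hollow_inverted_right_angled_triangle_alt
  rw [PySem.List.pyRange_neg_one, PySem.List.pyRange_one]
  simp only [sub_zero, List.map_map]
  apply List.ext_getElem
  · simp
  · intro k h1 h2
    simp only [List.getElem_map, List.getElem_range, Function.comp_apply]
    simp only [List.length_map, List.length_range] at h1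
    have hk : (k : Int) < n := by omega
    rw [pv_row_eq n k hk]
    simp
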